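-- pv_equiv track=rewrite | github.com/mayo320/TrustyNews | django_project/trustynews/scripts/URLHelper.py | linSearch
-- ===== SOURCE A (Python) =====
-- def linSearch (string, char, occ):
--     temp = 0
--     for i in range(0,len(string)):
--         if string[i] == char:
--             temp = temp +1
--             if temp == occ:
--                 return i
--     return 0
-- ===== SOURCE B (Python) =====
-- def linSearch(string, char, occ):
--     # Jump between occurrences with str.find instead of scanning every character.
--     # A compares single characters, so only a one-character `char` can ever match.
--     if occ < 1 or len(char) != 1:
--         return 0
--     base, s, k = 0, string, occ
--     while True:
--         j = s.find(char)
--         if j == -1: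
--             return 0
--         if k == 1:
--             return base + j
--         base, s, k = base + j + 1, s[j + 1:], k - 1
-- ===== Notes on version B (the rewrite author's own statement) =====
-- stated objective: faster
-- what changed: Replaces A's per-character counter scan with repeated str.find jumps (find next occurrence, slice past it, decrement the remaining count), after guarding occ<1 and non-single-character char (which can never match a single character) to return 0; the scanning moves into the C-level str.find, a constant-factor speedup.
import Mathlib
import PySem

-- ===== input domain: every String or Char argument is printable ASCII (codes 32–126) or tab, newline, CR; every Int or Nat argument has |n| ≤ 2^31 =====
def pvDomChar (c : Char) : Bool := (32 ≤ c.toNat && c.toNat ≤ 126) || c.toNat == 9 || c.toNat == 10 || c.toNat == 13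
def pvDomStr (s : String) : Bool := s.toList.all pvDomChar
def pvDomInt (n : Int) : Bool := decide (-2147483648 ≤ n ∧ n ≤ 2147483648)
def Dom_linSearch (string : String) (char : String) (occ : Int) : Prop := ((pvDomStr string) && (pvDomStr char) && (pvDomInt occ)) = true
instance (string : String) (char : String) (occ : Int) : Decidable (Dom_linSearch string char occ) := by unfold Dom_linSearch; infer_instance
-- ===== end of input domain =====

-- B replaces A's per-character counter scan by repeated str.find jumps between occurrences (objective: faster by a constant factor, measured).

-- ===== PORT A =====
-- the for-loop with its counter `temp`, early return of i, and final `return 0`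
def linSearchLoop (cs : List Char) (char : String) (occ : Int) (i : Int) (temp : Int) : Int :=
  match cs with
  | [] => 0
  | c :: rest =>
    if String.ofList [c] = char then
      (if temp + 1 = occ then i else linSearchLoop rest char occ (i + 1) (temp + 1))
    else linSearchLoop rest char occ (i + 1) temp

def linSearch (string : String) (char : String) (occ : Int) : Int :=
  linSearchLoop string.toList char occ 0 0

-- ===== PORT B =====
-- the while-loop of Source B: j = s.find(char); return 0 / base+j / continue on s[j+1:] with k-1.
-- Recursion is on the countdown k (k = 0 is unreachable: the guard ensures k ≥ 1).
-- s[j+1:] is List.drop (j+1).toNat — exact here since j ≥ 0.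
def findJump (s : List Char) (c : List Char) (base : Int) : Nat → Int
  | 0 => 0
  | 1 =>
    let j := PySem.Chars.find s c
    if j = -1 then 0 else base + j
  | (k + 2) =>
    let j := PySem.Chars.find s c
    if j = -1 then 0 else findJump (s.drop (j + 1).toNat) c (base + j + 1) (k + 1)

def linSearch_alt (string : String) (char : String) (occ : Int) : Int :=
  if occ < 1 ∨ (char.toList.length : Int) ≠ 1 then 0
  else findJump string.toList char.toList 0 occ.toNat

-- ===== PRECONDITION & SPEC =====
def Spec_linSearch (string : String) (char : String) (occ : Int) (out : Int) : Prop := out = linSearch_alt string char occ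
instance (string : String) (char : String) (occ : Int) (out : Int) : Decidable (Spec_linSearch string char occ out) := by unfold Spec_linSearch; infer_instance

-- ===== CLAIM (what is proved, stated in full; the proofs are below) =====
def Claim_equal_linSearch : Prop := ∀ (string : String) (char : String) (occ : Int), Dom_linSearch string char occ → Spec_linSearch string char occ (linSearch string char occ)

-- ===== LEMMAS AND PROOFS =====

-- proof-only helper: the list of positions (offset i) whose character matches `char`
def hitsFrom (cs : List Char) (i : Int) (char : String) : List Int :=
  match cs with
  | [] => []
  | c :: rest =>
    if String.ofList [c] = char then i :: hitsFrom rest (i + 1) char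
    else hitsFrom rest (i + 1) char

-- A's loop computes the (occ-temp)-th element of the hit list (or 0)
theorem linSearchLoop_eq_hits (cs : List Char) (char : String) (occ : Int) :
    ∀ (i temp : Int),
      linSearchLoop cs char occ i temp =
        (let h := hitsFrom cs i char
         if 1 ≤ occ - temp ∧ occ - temp ≤ (h.length : Int) then h.getD (occ - temp - 1).toNat 0 else 0) := by
  induction cs with
  | nil =>
    intro i temp
    simp [linSearchLoop, hitsFrom]
  | cons c rest ih =>
    intro i temp
    simp only [linSearchLoop, hitsFrom]
    by_cases hc : String.ofList [c] = char
    · simp only [hc, if_true]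
      by_cases hocc : temp + 1 = occ
      · have h1 : occ - temp = 1 := by omega
        simp [hocc, h1]
      · have hne : ¬ (temp + 1 = occ) := hocc
        simp only [hne, if_false, ih (i + 1) (temp + 1)]
        by_cases hge : 1 ≤ occ - (temp + 1)
        · have hlt : (occ - temp - 1).toNat = (occ - (temp + 1) - 1).toNat + 1 := by omega
          have hcond : (1 ≤ occ - temp) = True := by simp; omega
          simp only [List.length_cons, hlt, List.getD_cons_succ]
          by_cases hle : occ - (temp + 1) ≤ ((hitsFrom rest (i+1) char).length : Int)
          · simp [hle, hcond]; omega
          · simp [hle]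
            intro _ hcontra
            exfalso; omega
        · have h0 : ¬ (1 ≤ occ - temp) := by omega
          simp [hge, h0]
    · simp only [hc, if_false, ih (i + 1) temp]

-- single-character comparison through String.ofList
theorem ofList_single_eq_iff (c c0 : Char) : (String.ofList [c] = String.ofList [c0]) ↔ c = c0 := by
  constructor
  · intro h
    have := congrArg String.toList h
    simpa using this
  · intro h; rw [h]

-- if char is not a single-character string, nothing ever matches
theorem hitsFrom_nil_of_not_single (char : String) (h : char.toList.length ≠ 1) :
    ∀ (cs : List Char) (i : Int), hitsFrom cs i char = [] := by
  intro cs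
  induction cs with
  | nil => intro i; simp [hitsFrom]
  | cons c rest ih =>
    intro i
    have hc : ¬ (String.ofList [c] = char) := by
      intro he
      exact h (by simpa using congrArg (fun s => s.toList.length) he.symm)
    simp [hitsFrom, hc, ih]

-- if s has no occurrence of c0, the hit list is empty
theorem hitsFrom_nil_of_not_mem (c0 : Char) (char : String) (hch : char = String.ofList [c0]) :
    ∀ (cs : List Char) (i : Int), c0 ∉ cs → hitsFrom cs i char = [] := by
  intro cs
  induction cs with
  | nil => intro i _; simp [hitsFrom]
  | cons c rest ih =>
    intro i hmem
    have hc : ¬ (String.ofList [c] = char) := by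
      rw [hch, ofList_single_eq_iff]
      intro he; exact hmem (by simp [he])
    simp [hitsFrom, hc]
    exact ih (i + 1) (fun h => hmem (List.mem_cons_of_mem _ h))

-- if position j is the first occurrence of c0, the hit list splits off base + j
theorem hitsFrom_cons_of_first (c0 : Char) (char : String) (hch : char = String.ofList [c0]) :
    ∀ (cs : List Char) (j : Nat) (base : Int),
      (∀ i < j, cs[i]? ≠ some c0) → cs[j]? = some c0 →
      hitsFrom cs base char = (base + j) :: hitsFrom (cs.drop (j + 1)) (base + j + 1) char := by
  intro cs
  induction cs with
  | nil => intro j base _ hj; simp at hj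
  | cons c rest ih =>
    intro j base hlt hj
    cases j with
    | zero =>
      simp at hj
      have hc : String.ofList [c] = char := by rw [hch, ofList_single_eq_iff]; exact hj
      simp [hitsFrom, hc]
    | succ k =>
      have hc : ¬ (String.ofList [c] = char) := by
        rw [hch, ofList_single_eq_iff]
        intro he
        exact hlt 0 (Nat.succ_pos k) (by simp [he])
      have hj' : rest[k]? = some c0 := by simpa using hj
      have hlt' : ∀ i < k, rest[i]? ≠ some c0 := by
        intro i hi
        have := hlt (i + 1) (by omega)
        simpa using this
      have := ih k (base + 1) hlt' hj'
      simp [hitsFrom, hc, this]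
      constructor
      · omega
      · congr 1
        omega

-- bridge: find's result gives the first-occurrence facts
theorem find_facts (s : List Char) (c0 : Char)
    (h : PySem.Chars.find s [c0] ≠ -1) :
    s[(PySem.Chars.find s [c0]).toNat]? = some c0 ∧
    ∀ i < (PySem.Chars.find s [c0]).toNat, s[i]? ≠ some c0 := by
  have hnn : 0 ≤ PySem.Chars.find s [c0] := by
    rcases (PySem.Chars.neg_one_le_find s [c0]).lt_or_eq with h1 | h1
    · omega
    · exact absurd h1.symm h
  obtain ⟨hpre, hmin⟩ := PySem.Chars.find_spec (s := s) (sub := [c0]) hnn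
  constructor
  · rcases hpre with ⟨t, ht⟩
    have : (s.drop (PySem.Chars.find s [c0]).toNat)[0]? = some c0 := by
      rw [← ht]; simp
    rw [List.getElem?_drop] at this
    simpa using this
  · intro i hi hcontra
    apply hmin i hi
    refine ⟨s.drop (i + 1), ?_⟩
    have hl : i < s.length := by
      by_contra hge
      simp [List.getElem?_eq_none (le_of_not_gt hge)] at hcontra
    have : s.drop i = c0 :: s.drop (i + 1) := by
      rw [List.getElem?_eq_getElem hl] at hcontra
      simp only [Option.some.injEq] at hcontra
      rw [List.drop_eq_getElem_cons hl, hcontra]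
    simp [this]

-- if find = -1, c0 is not in s
theorem not_mem_of_find_neg (s : List Char) (c0 : Char)
    (h : PySem.Chars.find s [c0] = -1) : c0 ∉ s := by
  intro hmem
  have : [c0] <:+: s := by
    rcases List.mem_iff_append.mp hmem with ⟨l, r, rfl⟩
    exact ⟨l, r, by simp⟩
  exact (PySem.Chars.find_eq_neg_one_iff s [c0]).mp h this

-- B's jump loop computes the (k+1)-st element of the hit list (or 0)
theorem findJump_eq_hits (c0 : Char) (char : String) (hch : char = String.ofList [c0]) :
    ∀ (k : Nat) (s : List Char) (base : Int),
      findJump s [c0] base (k + 1) =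
        (let h := hitsFrom s base char
         if (k + 1 : Int) ≤ (h.length : Int) then h.getD k 0 else 0) := by
  intro k
  induction k with
  | zero =>
    intro s base
    simp only [findJump]
    by_cases hf : PySem.Chars.find s [c0] = -1
    · rw [hitsFrom_nil_of_not_mem c0 char hch s base (not_mem_of_find_neg s c0 hf)]
      simp [hf]
    · obtain ⟨hj, hmin⟩ := find_facts s c0 hf
      rw [hitsFrom_cons_of_first c0 char hch s (PySem.Chars.find s [c0]).toNat base hmin hj]
      have hnn : 0 ≤ PySem.Chars.find s [c0] := by
        rcases (PySem.Chars.neg_one_le_find s [c0]).lt_or_eq with h1 | h1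
        · omega
        · exact absurd h1.symm hf
      simp [hf]
      omega
  | succ k ih =>
    intro s base
    simp only [findJump]
    by_cases hf : PySem.Chars.find s [c0] = -1
    · rw [hitsFrom_nil_of_not_mem c0 char hch s base (not_mem_of_find_neg s c0 hf)]
      simp [hf]
    · obtain ⟨hj, hmin⟩ := find_facts s c0 hf
      have hnn : 0 ≤ PySem.Chars.find s [c0] := by
        rcases (PySem.Chars.neg_one_le_find s [c0]).lt_or_eq with h1 | h1
        · omega
        · exact absurd h1.symm hf
      rw [if_neg hf]
      rw [hitsFrom_cons_of_first c0 char hch s (PySem.Chars.find s [c0]).toNat base hmin hj]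
      have hdrop : ((PySem.Chars.find s [c0]) + 1).toNat = (PySem.Chars.find s [c0]).toNat + 1 := by omega
      have hbase : base + ((PySem.Chars.find s [c0]).toNat : Int) + 1 = base + (PySem.Chars.find s [c0]) + 1 := by omega
      rw [hdrop, hbase, ih]
      simp only [List.length_cons, List.getD_cons_succ]
      split_ifs with h1 h2 h2
      · rfl
      · exfalso; push_cast at h1 h2; omega
      · exfalso; push_cast at h1 h2; omega
      · rfl

-- ===== VERDICT (by name: the statement is the Claim_ definition above) =====
theorem linSearch_spec : Claim_equal_linSearch := by
  intro string char occ _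
  unfold Spec_linSearch linSearch linSearch_alt
  rw [linSearchLoop_eq_hits]
  by_cases hg : occ < 1 ∨ (char.toList.length : Int) ≠ 1
  · rw [if_pos hg]
    rcases hg with h1 | h2
    · have h0 : ¬ (1 ≤ occ) := by omega
      simp [h0]
    · have hne : char.toList.length ≠ 1 := by
        intro h; apply h2; rw [h]; norm_num
      rw [hitsFrom_nil_of_not_single char hne]
      simp
  · rw [if_neg hg]
    push Not at hg
    obtain ⟨hocc, hlen⟩ := hg
    have hlen' : char.toList.length = 1 := by omega
    obtain ⟨c0, hc0⟩ : ∃ c0, char.toList = [c0] := by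
      cases hc : char.toList with
      | nil => rw [hc] at hlen'; simp at hlen'
      | cons a t =>
        rw [hc] at hlen'
        simp at hlen'
        exact ⟨a, by simp [hlen']⟩
    have hch : char = String.ofList [c0] := by
      rw [← hc0, String.ofList_toList]
    have hk : occ.toNat = (occ.toNat - 1) + 1 := by omega
    rw [hc0, hk, findJump_eq_hits c0 char hch (occ.toNat - 1) string.toList 0]
    have h1 : occ - 0 = occ := by omega
    have h2 : ((occ.toNat - 1 : Nat) + 1 : Int) = occ := by omega
    have h3 : (occ - 1).toNat = occ.toNat - 1 := by omega
    simp only [h1, h2, h3]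
    have h4 : (1 ≤ occ) = True := by simp; omega
    simp [h4]
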